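-- pv_equiv track=rewrite | github.com/JonathanSaleh123/General | CIS61/lab5/lab5.py | add_chars
-- ===== SOURCE A (Python) =====
-- def add_chars(w1,w2):
--     """
--     Return a string containing the characters you need to add to w1 to get w2.
--     You may assume that w1 is a subsequence of w2.
--     >>> add_chars("owl", "howl")
--     'h'
--     >>> add_chars("want", "wanton")
--     'on'
--     >>> add_chars("rat", "radiate")
--     'diae'
--     >>> add_chars("a", "prepare")
--     'prepre'
--     >>> add_chars("resin", "recursion")
--     'curo'
--     >>> add_chars("fin", "effusion")
--     'efuso'
--     >>> add_chars("coy", "cacophony")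
--     'acphon'
--     """
--     "*** YOUR CODE HERE ***"
--     if not w1:
--         return w2
--     elif w1[0] == w2[0]:
--         return add_chars(w1[1:], w2[1:])
--     else:
--         return w2[0] + add_chars(w1, w2[1:])
-- ===== SOURCE B (Python) =====
-- def add_chars(w1, w2):
--     i = 0
--     out = []
--     for c in w2:
--         if i < len(w1) and c == w1[i]:
--             i += 1
--         else:
--             out.append(c)
--     return ''.join(out)
-- ===== Notes on version B (the rewrite author's own statement) =====
-- stated objective: faster
-- what changed: Replaces A's recursion with per-call string slicing (each w1[1:]/w2[1:] copies the rest of the string) by a single two-pointer pass over w2 that collects unmatched characters in a list and joins once.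
import Mathlib
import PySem

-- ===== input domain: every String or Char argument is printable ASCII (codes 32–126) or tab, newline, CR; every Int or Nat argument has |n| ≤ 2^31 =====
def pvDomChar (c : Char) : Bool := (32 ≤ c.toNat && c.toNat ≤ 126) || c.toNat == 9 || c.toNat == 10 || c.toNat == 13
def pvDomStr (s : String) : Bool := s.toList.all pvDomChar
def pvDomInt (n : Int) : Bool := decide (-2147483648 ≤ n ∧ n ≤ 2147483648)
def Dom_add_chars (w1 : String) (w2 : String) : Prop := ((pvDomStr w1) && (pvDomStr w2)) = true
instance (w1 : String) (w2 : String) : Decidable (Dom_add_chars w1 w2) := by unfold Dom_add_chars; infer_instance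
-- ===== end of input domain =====

-- B replaces A's slicing recursion by a single two-pointer pass over w2 (objective: faster, asymptotic).


-- ===== PORT A =====
-- A's recursion on (w1, w2); the case 'w1 nonempty, w2 empty' is where Python raises
-- IndexError (w2[0]); it is excluded by Pre_add_chars below.
def addCharsRecA : List Char → List Char → List Char
  | [], w2 => w2
  | _ :: _, [] => []          -- Python raises here (outside Pre_)
  | a :: w1, b :: w2 =>
      if a == b then addCharsRecA w1 w2
      else b :: addCharsRecA (a :: w1) w2
termination_by _ w2 => w2.length

def add_chars (w1 : String) (w2 : String) : String :=
  String.ofList (addCharsRecA w1.toList w2.toList)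

-- ===== PORT B =====
-- B: fold over w2 with state (i, out): i = next index into w1, out = collected chars.
def add_chars_alt (w1 : String) (w2 : String) : String :=
  let l1 := w1.toList
  let r := w2.toList.foldl
    (fun (s : Nat × List Char) c =>
      if l1[s.1]? = some c then (s.1 + 1, s.2) else (s.1, s.2 ++ [c]))
    (0, [])
  String.ofList r.2

-- ===== PRECONDITION & SPEC =====
-- Pre_: Python A raises IndexError whenever w1 is not a subsequence of w2.
def Pre_add_chars (w1 : String) (w2 : String) : Prop := w1.toList.Sublist w2.toList
instance (w1 : String) (w2 : String) : Decidable (Pre_add_chars w1 w2) := by unfold Pre_add_chars; infer_instance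
def pvWitness_add_chars : String × String := ("owl", "howl")


def Spec_add_chars (w1 : String) (w2 : String) (out : String) : Prop := out = add_chars_alt w1 w2
instance (w1 : String) (w2 : String) (out : String) : Decidable (Spec_add_chars w1 w2 out) := by unfold Spec_add_chars; infer_instance

-- ===== CLAIM (what is proved, stated in full; the proofs are below) =====
def Claim_equal_add_chars : Prop := ∀ (w1 : String) (w2 : String), Dom_add_chars w1 w2 → Pre_add_chars w1 w2 → Spec_add_chars w1 w2 (add_chars w1 w2)

-- ===== LEMMAS AND PROOFS =====

-- Loop invariant: with i characters of l1 already matched and acc collected,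
-- finishing the fold yields acc ++ (A's recursion on the remaining suffix of l1).
lemma addChars_fold_eq (l2 : List Char) : ∀ (l1 : List Char) (i : Nat) (acc : List Char),
    (l2.foldl (fun (s : Nat × List Char) c =>
        if l1[s.1]? = some c then (s.1 + 1, s.2) else (s.1, s.2 ++ [c])) (i, acc)).2
      = acc ++ addCharsRecA (l1.drop i) l2 := by
  induction l2 with
  | nil =>
    intro l1 i acc
    cases h : l1.drop i with
    | nil => simp [addCharsRecA]
    | cons a rest => simp [addCharsRecA]
  | cons c cs ih =>
    intro l1 i acc
    cases h : l1.drop i with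
    | nil =>
      have hget : l1[i]? = none := by
        have h0 : (l1.drop i)[0]? = none := by rw [h]; rfl
        rw [List.getElem?_drop] at h0
        simpa using h0
      simp only [List.foldl_cons, hget]
      rw [if_neg (by simp)]
      rw [ih l1 i (acc ++ [c]), h]
      simp [addCharsRecA]
    | cons a rest =>
      have hget : l1[i]? = some a := by
        have h0 : (l1.drop i)[0]? = some a := by rw [h]; rfl
        rw [List.getElem?_drop] at h0
        simpa using h0
      have hdrop : l1.drop (i + 1) = rest := by
        have : l1.drop (i + 1) = (l1.drop i).drop 1 := by
          rw [List.drop_drop]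
        rw [this, h]; rfl
      simp only [List.foldl_cons]
      by_cases hc : a = c
      · rw [if_pos (by simp [hget, hc])]
        rw [ih l1 (i + 1) acc, hdrop]
        simp [addCharsRecA, hc]
      · rw [if_neg (by simp [hget]; intro e; exact hc e)]
        rw [ih l1 i (acc ++ [c]), h]
        simp [addCharsRecA, hc]

-- ===== VERDICT =====
theorem add_chars_spec : Claim_equal_add_chars := by
  intro w1 w2 _ _
  unfold Spec_add_chars add_chars add_chars_alt
  simp only
  rw [addChars_fold_eq w2.toList w1.toList 0 []]
  simp
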